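-- pv_equiv track=rewrite | github.com/YuneeeM/Python_Algorithm | 프로그래머스/1016-lv1/1024=10.py | solution
-- ===== SOURCE A (Python) =====
-- def solution(s):
--     answer = []
--     arr = []
--
--     for i in range(len(s)):
--         if s[i] in arr:
--             answer.append(i-arr.index(s[i]))
--             arr[arr.index(s[i])] = "-1"
--         else:
--             answer.append(-1)
--
--         arr.append(s[i])
--
--     return answer
-- ===== SOURCE B (Python) =====
-- def solution(s):
--     # Two staged passes: group the indices of each character, then scatter
--     # the gaps between consecutive occurrences into a prefilled answer array.
--     positions = {}
--     for i, c in enumerate(s):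
--         positions.setdefault(c, []).append(i)
--     answer = [-1] * len(s)
--     for idxs in positions.values():
--         for prev, cur in zip(idxs, idxs[1:]):
--             answer[cur] = cur - prev
--     return answer
-- ===== Notes on version B (the rewrite author's own statement) =====
-- stated objective: faster
-- what changed: Replaced A's online scan-and-mark loop (membership test plus two linear index scans over a growing marker list per character) with two staged passes: first group all indices by character into per-character occurrence lists, then scatter the gaps between consecutive occurrences into a prefilled [-1]*n answer array.
import Mathlib
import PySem

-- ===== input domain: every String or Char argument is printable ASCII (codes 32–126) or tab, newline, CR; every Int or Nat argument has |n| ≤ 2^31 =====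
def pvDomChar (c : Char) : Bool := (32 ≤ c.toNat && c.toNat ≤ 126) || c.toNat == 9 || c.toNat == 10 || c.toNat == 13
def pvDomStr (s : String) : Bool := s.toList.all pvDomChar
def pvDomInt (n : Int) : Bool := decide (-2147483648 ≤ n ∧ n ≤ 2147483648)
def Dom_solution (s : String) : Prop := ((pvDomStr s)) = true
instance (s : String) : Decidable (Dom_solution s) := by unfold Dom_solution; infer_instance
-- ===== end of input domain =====

-- B replaces A's online scan-and-mark loop by two staged passes: group the indices of each
-- character, then scatter the gaps between consecutive occurrences into a prefilled answer
-- array (objective: faster, asymptotic).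

-- ===== PORT A =====
-- loop body of A: 'if s[i] in arr: answer.append(i-arr.index(s[i])); arr[arr.index(s[i])]="-1"
-- else: answer.append(-1); arr.append(s[i])'  ('in'/'.index' fused into one index? match:
-- 'x in arr' holds iff index? is some)
def stepA (st : List Int × List String) (i : Int) (c : Char) : List Int × List String :=
  let cstr := String.singleton c
  match PySem.List.index? st.2 cstr with
  | some j => (st.1 ++ [i - (j : Int)], st.2.set j "-1" ++ [cstr])
  | none => (st.1 ++ [-1], st.2 ++ [cstr])

def solution (s : String) : List Int :=
  let cs := s.toList
  ((PySem.List.pyRange 0 (PySem.List.len cs) 1).foldl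
    (fun st i => stepA st i (PySem.List.pyGetD cs i ' ')) ([], [])).1

-- ===== PORT B =====
-- inner loop of B: 'for prev, cur in zip(idxs, idxs[1:]): answer[cur] = cur - prev'
-- (every cur is a nonnegative in-range index — it came from enumerate — so the Python
--  list assignment is exactly the total form pySetD here)
def scatterB (a : List Int) (idxs : List Int) : List Int :=
  (idxs.zip (PySem.List.slice idxs (some 1) none)).foldl
    (fun acc pr => PySem.List.pySetD acc pr.2 (pr.2 - pr.1)) a

-- B: 'positions.setdefault(c, []).append(i)' is 'positions[c] = positions.get(c, []) + [i]',
-- i.e. Dict.modify; then 'answer = [-1]*len(s)' and the scatter loop over positions.values()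
def solution_alt (s : String) : List Int :=
  ((PySem.List.enumerate s.toList 0).foldl
      (fun d p => d.modify p.2 [] (fun l => l ++ [p.1])) PySem.Dict.empty).values.foldl
    scatterB (List.replicate s.toList.length (-1))

-- ===== PRECONDITION & SPEC =====
def Spec_solution (s : String) (out : List Int) : Prop := out = solution_alt s
instance (s : String) (out : List Int) : Decidable (Spec_solution s out) := by unfold Spec_solution; infer_instance

-- ===== CLAIM (what is proved, stated in full; the proofs are below) =====
def Claim_equal_solution : Prop := ∀ (s : String), Dom_solution s → Spec_solution s (solution s)

-- ===== LEMMAS AND PROOFS =====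

-- A's fold state over the enumerated characters
def AStA (cs : List Char) : List Int × List String :=
  (PySem.List.enumerate cs 0).foldl (fun st p => stepA st p.1 p.2) ([], [])

-- the (ascending) indices at which character c occurs in cs
def occL (cs : List Char) (c : Char) : List Int :=
  ((PySem.List.enumerate cs 0).filter (fun p => p.2 == c)).map (fun p => p.1)

-- positions (counted from k) of the entries of arr equal to x
def pos (arr : List String) (k : Int) (x : String) : List Int :=
  match arr with
  | [] => []
  | y :: t => if y = x then k :: pos t (k + 1) x else pos t (k + 1) x

theorem singleton_injective {c c' : Char} (h : String.singleton c = String.singleton c') : c = c' := by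
  have := congrArg String.toList h
  simpa using this

theorem singleton_ne_marker (c : Char) : String.singleton c ≠ "-1" := by
  intro h
  have := congrArg (fun s => s.toList.length) h
  simp at this

theorem pos_eq_nil_iff (arr : List String) (k : Int) (x : String) :
    pos arr k x = [] ↔ x ∉ arr := by
  induction arr generalizing k with
  | nil => simp [pos]
  | cons y t ih =>
    by_cases h : y = x
    · subst h; simp [pos]
    · simp [pos, h, ih, Ne.symm h]

theorem pos_append (arr : List String) (y : String) (k : Int) (x : String) :
    pos (arr ++ [y]) k x = pos arr k x ++ (if y = x then [k + arr.length] else []) := by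
  induction arr generalizing k with
  | nil => simp [pos]
  | cons z t ih =>
    by_cases h : z = x <;> simp [pos, h, ih, add_comm, add_left_comm]

theorem pos_index_head (arr : List String) (x : String) (j : Nat)
    (hx : x ≠ "-1") (h : PySem.List.index? arr x = some j) (k : Int) :
    pos arr k x = (k + j) :: pos (arr.set j "-1") k x := by
  induction arr generalizing j k with
  | nil => simp [PySem.List.index?_eq_idxOf?] at h
  | cons y t ih =>
    by_cases hy : y = x
    · subst hy
      rw [PySem.List.index?_cons_self] at h
      cases h
      simp [pos, Ne.symm hx]
    · rw [PySem.List.index?_cons_of_ne t hy] at h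
      cases hj : PySem.List.index? t x with
      | none => rw [hj] at h; simp at h
      | some j' =>
        rw [hj] at h
        simp at h
        subst h
        have := ih j' hj (k + 1)
        simp [pos, hy, this]
        ring_nf

theorem pos_set_of_ne (arr : List String) (j : Nat) (v w x : String)
    (hv : arr[j]? = some v) (hvx : v ≠ x) (hwx : w ≠ x) (k : Int) :
    pos (arr.set j w) k x = pos arr k x := by
  induction arr generalizing j k with
  | nil => simp at hv
  | cons y t ih =>
    cases j with
    | zero =>
      simp at hv
      subst hv
      simp [pos, hvx, hwx]
    | succ j' =>
      simp at hv
      by_cases hy : y = x <;> simp [pos, hy, ih j' hv]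

theorem index?_of_pos_cons (arr : List String) (x : String) (k j : Int) (rest : List Int)
    (h : pos arr k x = j :: rest) : ∃ jn : Nat, PySem.List.index? arr x = some jn ∧ j = k + jn := by
  induction arr generalizing k with
  | nil => simp [pos] at h
  | cons y t ih =>
    by_cases hy : y = x
    · subst hy
      simp [pos] at h
      refine ⟨0, PySem.List.index?_cons_self _ _, by omega⟩
    · simp [pos, hy] at h
      obtain ⟨jn, hjn, hj⟩ := ih (k + 1) h
      exact ⟨jn + 1, by rw [PySem.List.index?_cons_of_ne t hy, hjn]; rfl, by push_cast; omega⟩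

-- occL facts
theorem occL_nil (c : Char) : occL [] c = [] := by
  simp [occL, PySem.List.enumerate_nil]

theorem occL_append (cs : List Char) (x c : Char) :
    occL (cs ++ [x]) c = occL cs c ++ (if x = c then [(cs.length : Int)] else []) := by
  simp [occL, PySem.List.enumerate_append, PySem.List.enumerate_cons, PySem.List.enumerate_nil,
    List.filter_append]
  by_cases h : x = c <;> simp [h]

theorem occL_mem_bound (cs : List Char) (c : Char) (j : Int) (hj : j ∈ occL cs c) :
    0 ≤ j ∧ j < cs.length := by
  simp only [occL, List.mem_map, List.mem_filter] at hj
  obtain ⟨p, ⟨hp, -⟩, rfl⟩ := hj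
  rw [PySem.List.mem_enumerate_iff] at hp
  obtain ⟨k, hk, rfl⟩ := hp
  omega

theorem occL_eq_nil_iff (cs : List Char) (c : Char) : occL cs c = [] ↔ c ∉ cs := by
  rw [occL, List.map_eq_nil_iff, List.filter_eq_nil_iff]
  constructor
  · intro h hc
    have : c ∈ (PySem.List.enumerate cs 0).map (fun p => p.2) := by
      rw [PySem.List.map_snd_enumerate]; exact hc
    obtain ⟨p, hp, hpc⟩ := List.mem_map.mp this
    exact absurd (by simp [hpc]) (h p hp)
  · intro h p hp hpc
    apply h
    have : p.2 ∈ (PySem.List.enumerate cs 0).map (fun p => p.2) := List.mem_map_of_mem hp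
    rw [PySem.List.map_snd_enumerate] at this
    simp at hpc
    rwa [hpc] at this

-- scatterB facts
theorem scatterB_eq (a idxs : List Int) :
    scatterB a idxs = (idxs.zip idxs.tail).foldl
      (fun acc pr => PySem.List.pySetD acc pr.2 (pr.2 - pr.1)) a := by
  rw [scatterB, PySem.List.slice_from_one]

theorem setFold_length (ps : List (Int × Int)) (a : List Int) :
    (ps.foldl (fun acc pr => PySem.List.pySetD acc pr.2 (pr.2 - pr.1)) a).length = a.length := by
  induction ps generalizing a with
  | nil => rfl
  | cons p t ih => simp [ih, PySem.List.length_pySetD]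

theorem scatterB_length (a idxs : List Int) : (scatterB a idxs).length = a.length := by
  rw [scatterB_eq]; exact setFold_length _ _

theorem scatterB_singleton (a : List Int) (x : Int) : scatterB a [x] = a := by
  simp [scatterB_eq]

theorem zip_tail_concat (l : List Int) (j x : Int) (h : l.getLast? = some j) :
    (l ++ [x]).zip (l ++ [x]).tail = l.zip l.tail ++ [(j, x)] := by
  induction l generalizing j with
  | nil => simp at h
  | cons y t ih =>
    cases t with
    | nil => simp at h; simp [h]
    | cons z t' =>
      have := ih j (by simpa using h)
      simp only [List.cons_append, List.tail_cons] at this ⊢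
      rw [List.zip_cons_cons, this]
      cases t' <;> simp

theorem scatterB_concat (a l : List Int) (j x : Int) (h : l.getLast? = some j) :
    scatterB a (l ++ [x]) = PySem.List.pySetD (scatterB a l) x (x - j) := by
  rw [scatterB_eq, scatterB_eq, zip_tail_concat l j x h, List.foldl_append]
  rfl

theorem set_at_end (l : List Int) (y v : Int) : (l ++ [y]).set l.length v = l ++ [v] := by
  induction l with
  | nil => rfl
  | cons z t ih => simp [ih]

theorem setFold_append (ps : List (Int × Int)) (a : List Int) (x : Int)
    (h : ∀ p ∈ ps, 0 ≤ p.2 ∧ p.2 < (a.length : Int)) :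
    ps.foldl (fun acc pr => PySem.List.pySetD acc pr.2 (pr.2 - pr.1)) (a ++ [x])
      = ps.foldl (fun acc pr => PySem.List.pySetD acc pr.2 (pr.2 - pr.1)) a ++ [x] := by
  induction ps generalizing a with
  | nil => rfl
  | cons p t ih =>
    obtain ⟨h0, h1⟩ := h p (by simp)
    simp only [List.foldl_cons]
    rw [PySem.List.pySetD_of_nonneg _ _ h0, PySem.List.pySetD_of_nonneg _ _ h0,
      List.set_append_left _ _ (by omega)]
    rw [ih]
    intro q hq
    have := h q (by simp [hq])
    simpa [List.length_set] using this

theorem scatterB_append (a idxs : List Int) (x : Int)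
    (h : ∀ j ∈ idxs, 0 ≤ j ∧ j < (a.length : Int)) :
    scatterB (a ++ [x]) idxs = scatterB a idxs ++ [x] := by
  rw [scatterB_eq, scatterB_eq]
  apply setFold_append
  intro p hp
  exact h p.2 (List.mem_of_mem_tail (List.of_mem_zip hp).2)

theorem setFold_set_comm (ps : List (Int × Int)) (a : List Int) (n v : Int) (hn : 0 ≤ n)
    (h : ∀ p ∈ ps, 0 ≤ p.2 ∧ p.2 < n) :
    ps.foldl (fun acc pr => PySem.List.pySetD acc pr.2 (pr.2 - pr.1)) (PySem.List.pySetD a n v)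
      = PySem.List.pySetD (ps.foldl (fun acc pr => PySem.List.pySetD acc pr.2 (pr.2 - pr.1)) a) n v := by
  induction ps generalizing a with
  | nil => rfl
  | cons p t ih =>
    obtain ⟨h0, h1⟩ := h p (by simp)
    simp only [List.foldl_cons]
    have hcomm : PySem.List.pySetD (PySem.List.pySetD a n v) p.2 (p.2 - p.1)
        = PySem.List.pySetD (PySem.List.pySetD a p.2 (p.2 - p.1)) n v := by
      rw [PySem.List.pySetD_of_nonneg _ _ h0, PySem.List.pySetD_of_nonneg _ _ hn,
        PySem.List.pySetD_of_nonneg _ _ hn, PySem.List.pySetD_of_nonneg _ _ h0,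
        List.set_comm _ _ (by omega)]
    rw [hcomm]
    exact ih _ (fun q hq => h q (by simp [hq]))

theorem scatterB_set_comm (a idxs : List Int) (n v : Int) (hn : 0 ≤ n)
    (h : ∀ j ∈ idxs, 0 ≤ j ∧ j < n) :
    scatterB (PySem.List.pySetD a n v) idxs = PySem.List.pySetD (scatterB a idxs) n v := by
  rw [scatterB_eq, scatterB_eq]
  apply setFold_set_comm _ _ _ _ hn
  intro p hp
  exact h p.2 (List.mem_of_mem_tail (List.of_mem_zip hp).2)

-- fold-over-distinct-characters lemmas
theorem keyfold_length (K : List Char) (f : Char → List Int) (a : List Int) :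
    (K.foldl (fun acc c => scatterB acc (f c)) a).length = a.length := by
  induction K generalizing a with
  | nil => rfl
  | cons k t ih => simp [ih, scatterB_length]

theorem keyfold_append (K : List Char) (f : Char → List Int) (a : List Int) (x : Int)
    (h : ∀ c ∈ K, ∀ j ∈ f c, 0 ≤ j ∧ j < (a.length : Int)) :
    K.foldl (fun acc c => scatterB acc (f c)) (a ++ [x])
      = K.foldl (fun acc c => scatterB acc (f c)) a ++ [x] := by
  induction K generalizing a with
  | nil => rfl
  | cons k t ih =>
    simp only [List.foldl_cons]
    rw [scatterB_append _ _ _ (h k (by simp)), ih]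
    intro c hc j hj
    have := h c (by simp [hc]) j hj
    rwa [scatterB_length]

theorem keyfold_set_comm (K : List Char) (f : Char → List Int) (a : List Int) (n v : Int)
    (hn : 0 ≤ n) (h : ∀ c ∈ K, ∀ j ∈ f c, 0 ≤ j ∧ j < n) :
    K.foldl (fun acc c => scatterB acc (f c)) (PySem.List.pySetD a n v)
      = PySem.List.pySetD (K.foldl (fun acc c => scatterB acc (f c)) a) n v := by
  induction K generalizing a with
  | nil => rfl
  | cons k t ih =>
    simp only [List.foldl_cons]
    rw [scatterB_set_comm _ _ _ _ hn (h k (by simp)), ih _ (fun c hc => h c (by simp [hc]))]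

theorem keyfold_update (K : List Char) (c : Char) (f : Char → List Int) (n j : Int)
    (hc : c ∈ K) (hnd : K.Nodup) (hlast : (f c).getLast? = some j) (hn : 0 ≤ n)
    (hb : ∀ c' ∈ K, ∀ i ∈ f c', 0 ≤ i ∧ i < n) (a : List Int) :
    K.foldl (fun acc c' => scatterB acc (if c' = c then f c ++ [n] else f c')) a
      = PySem.List.pySetD (K.foldl (fun acc c' => scatterB acc (f c')) a) n (n - j) := by
  induction K generalizing a with
  | nil => simp at hc
  | cons k t ih =>
    simp only [List.foldl_cons]
    by_cases hk : k = c
    · subst hk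
      have hknotin : k ∉ t := (List.nodup_cons.mp hnd).1
      simp only [if_true]
      rw [scatterB_concat _ _ _ _ hlast]
      rw [PySem.List.foldl_congr_mem t _ (fun acc c' => scatterB acc (f c'))
        _ (fun acc x hx => by
          have : x ≠ k := fun h => hknotin (h ▸ hx)
          simp [this])]
      exact keyfold_set_comm t f _ n (n - j) hn (fun c' hc' => hb c' (by simp [hc']))
    · rw [if_neg hk]
      exact ih ((List.mem_cons.mp hc).resolve_left (fun h => hk h.symm)) (List.nodup_cons.mp hnd).2
        (fun c' hc' => hb c' (List.mem_cons_of_mem _ hc')) _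

-- Set.ofList facts specialised to appending one element
theorem ofList_concat (cs : List Char) (c : Char) :
    PySem.Set.ofList (cs ++ [c])
      = if c ∈ PySem.Set.ofList cs then PySem.Set.ofList cs else PySem.Set.ofList cs ++ [c] := by
  rw [PySem.Set.ofList, PySem.Set.ofList, List.foldl_append]
  simp [PySem.Set.add]

-- ===== the main invariant =====
theorem main_inv (cs : List Char) :
    (AStA cs).1 = (PySem.Set.ofList cs).foldl (fun a c => scatterB a (occL cs c))
        (List.replicate cs.length (-1))
    ∧ (AStA cs).2.length = cs.length
    ∧ ∀ c : Char, pos (AStA cs).2 0 (String.singleton c) = ((occL cs c).getLast?).toList := by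
  induction cs using List.reverseRecOn with
  | nil =>
    refine ⟨rfl, rfl, fun c => by simp [AStA, PySem.List.enumerate_nil, pos, occL_nil]⟩
  | append_singleton cs c ih =>
    obtain ⟨ih1, ih2, ih3⟩ := ih
    have hstep : AStA (cs ++ [c]) = stepA (AStA cs) (cs.length : Int) c := by
      rw [AStA, PySem.List.enumerate_append, List.foldl_append]
      simp [PySem.List.enumerate_cons, PySem.List.enumerate_nil, AStA]
    have hbound : ∀ c' ∈ PySem.Set.ofList cs, ∀ j ∈ occL cs c', 0 ≤ j ∧ j < (cs.length : Int) :=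
      fun c' _ j hj => occL_mem_bound cs c' j hj
    have hrep : List.replicate (cs ++ [c]).length (-1 : Int)
        = List.replicate cs.length (-1) ++ [-1] := by
      simp [List.replicate_succ']
    by_cases hc : c ∈ cs
    · -- repeated character: A matches the last unmatched occurrence, B sets one gap
      have hne : occL cs c ≠ [] := fun h => ((occL_eq_nil_iff cs c).mp h) hc
      obtain ⟨j, hj⟩ : ∃ j, (occL cs c).getLast? = some j := by
        cases h : (occL cs c).getLast? with
        | none => exact absurd (List.getLast?_eq_none_iff.mp h) hne
        | some j => exact ⟨j, rfl⟩
      have hjmem : j ∈ occL cs c := List.mem_of_getLast? hj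
      have hjb := occL_mem_bound cs c j hjmem
      have hpos : pos (AStA cs).2 0 (String.singleton c) = [j] := by
        rw [ih3 c, hj]; rfl
      obtain ⟨jn, hjn, hjeq⟩ := index?_of_pos_cons _ _ 0 j [] hpos
      have hstepA : stepA (AStA cs) (cs.length : Int) c
          = ((AStA cs).1 ++ [(cs.length : Int) - jn],
             (AStA cs).2.set jn "-1" ++ [String.singleton c]) := by
        simp only [stepA, hjn]
      have hposset : pos ((AStA cs).2.set jn "-1") 0 (String.singleton c) = [] := by
        have := pos_index_head (AStA cs).2 (String.singleton c) jn (singleton_ne_marker c) hjn 0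
        rw [hpos] at this
        exact (List.cons_eq_cons.mp this).2.symm
      have hget : (AStA cs).2[jn]? = some (String.singleton c) := by
        obtain ⟨hk, hv, -⟩ := PySem.List.getElem_of_index?_eq_some hjn
        simp [hk, hv]
      refine ⟨?_, ?_, ?_⟩
      · -- answers agree
        rw [hstep, hstepA]
        have hKeq : PySem.Set.ofList (cs ++ [c]) = PySem.Set.ofList cs := by
          rw [ofList_concat, if_pos ((PySem.Set.mem_ofList _ _).mpr hc)]
        rw [hKeq, hrep]
        have hfun : ∀ (acc : List Int), ∀ c' ∈ PySem.Set.ofList cs,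
            scatterB acc (occL (cs ++ [c]) c')
              = scatterB acc (if c' = c then occL cs c ++ [(cs.length : Int)] else occL cs c') := by
          intro acc c' _
          rw [occL_append]
          by_cases h : c' = c
          · subst h; simp
          · rw [if_neg (fun hh => h hh.symm)]; simp [h]
        rw [PySem.List.foldl_congr_mem _ _ _ _ hfun]
        rw [keyfold_update (PySem.Set.ofList cs) c (occL cs) (cs.length : Int) j
          ((PySem.Set.mem_ofList _ _).mpr hc) (PySem.Set.nodup_ofList cs) hj (by positivity) hbound]
        rw [keyfold_append _ _ _ _ (by simpa using hbound), ← ih1]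
        have hlen : (AStA cs).1.length = cs.length := by
          rw [ih1, keyfold_length]; simp
        rw [PySem.List.pySetD_of_nonneg _ _ (by positivity)]
        have : ((cs.length : Int)).toNat = (AStA cs).1.length := by simp [hlen]
        rw [this, set_at_end]
        have : (cs.length : Int) - jn = (cs.length : Int) - j := by omega
        rw [this]
      · rw [hstep, hstepA]; simp [ih2]
      · intro c'
        rw [hstep, hstepA]
        by_cases h : c' = c
        · subst h
          simp only [pos_append, hposset]
          rw [occL_append, if_pos rfl]
          simp [List.length_set, ih2]
        · have h1 : String.singleton c ≠ String.singleton c' :=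
            fun hh => h (singleton_injective hh).symm
          have h2 : ("-1" : String) ≠ String.singleton c' := (singleton_ne_marker c').symm
          rw [pos_append, if_neg h1, pos_set_of_ne _ jn (String.singleton c) "-1"
            (String.singleton c') hget h1 h2 0]
          rw [occL_append, if_neg (fun hh => h hh.symm)]
          simp [ih3 c']
    · -- first occurrence: A appends -1, B appends a fresh singleton occurrence list
      have hnil : occL cs c = [] := (occL_eq_nil_iff cs c).mpr hc
      have hnotin : String.singleton c ∉ (AStA cs).2 := by
        rw [← pos_eq_nil_iff _ 0, ih3 c, hnil]
        rfl
      have hidx : PySem.List.index? (AStA cs).2 (String.singleton c) = none :=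
        (PySem.List.index?_eq_none_iff _ _).mpr hnotin
      have hstepA : stepA (AStA cs) (cs.length : Int) c
          = ((AStA cs).1 ++ [-1], (AStA cs).2 ++ [String.singleton c]) := by
        simp only [stepA, hidx]
      refine ⟨?_, ?_, ?_⟩
      · rw [hstep, hstepA]
        have hKeq : PySem.Set.ofList (cs ++ [c]) = PySem.Set.ofList cs ++ [c] := by
          rw [ofList_concat, if_neg (fun hh => hc ((PySem.Set.mem_ofList _ _).mp hh))]
        rw [hKeq, hrep, List.foldl_append]
        have hfun : ∀ (acc : List Int), ∀ c' ∈ PySem.Set.ofList cs,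
            scatterB acc (occL (cs ++ [c]) c') = scatterB acc (occL cs c') := by
          intro acc c' hc'
          have : c' ≠ c := fun h => hc (h ▸ (PySem.Set.mem_ofList _ _).mp hc')
          rw [occL_append, if_neg (fun h => this h.symm)]
          simp
        rw [PySem.List.foldl_congr_mem _ _ _ _ hfun]
        rw [keyfold_append _ _ _ _ (by simpa using hbound), ← ih1]
        simp only [List.foldl_cons, List.foldl_nil]
        rw [occL_append, if_pos rfl, hnil]
        simpa using (scatterB_singleton ((AStA cs).1 ++ [-1]) (cs.length : Int))
      · rw [hstep, hstepA]; simp [ih2]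
      · intro c'
        rw [hstep, hstepA, pos_append]
        by_cases h : c' = c
        · subst h
          rw [if_pos rfl, ih3 c', hnil, occL_append, if_pos rfl]
          simp [ih2]
        · have h1 : String.singleton c ≠ String.singleton c' :=
            fun hh => h (singleton_injective hh).symm
          rw [if_neg h1, occL_append, if_neg (fun hh => h hh.symm)]
          simp [ih3 c']

-- A's index loop over s, read through enumerate: same fold, packaged as (index, char) pairs
theorem solution_eq_AStA (s : String) : solution s = (AStA s.toList).1 := by
  unfold solution AStA
  rw [PySem.List.enumerate_eq_map_pyRange s.toList ' ', List.foldl_map]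

-- B's dict of per-character occurrence lists, read off: values = occurrence lists of the
-- distinct characters in order of first appearance
theorem solution_alt_eq (s : String) :
    solution_alt s = (PySem.Set.ofList s.toList).foldl
      (fun a c => scatterB a (occL s.toList c)) (List.replicate s.toList.length (-1)) := by
  unfold solution_alt
  have hfold : (PySem.List.enumerate s.toList 0).foldl
      (fun d p => d.modify p.2 [] (fun l => l ++ [p.1])) PySem.Dict.empty
      = ((PySem.List.enumerate s.toList 0).map (fun p => (p.2, p.1))).foldl
        (fun d q => d.modify q.1 [] (fun l => l ++ [q.2])) PySem.Dict.empty := by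
    rw [List.foldl_map]
  have hkeys : ((PySem.List.enumerate s.toList 0).foldl
      (fun d p => d.modify p.2 [] (fun l => l ++ [p.1])) PySem.Dict.empty).keys
      = PySem.Set.ofList s.toList := by
    rw [PySem.Dict.keys_foldl_modify_key (PySem.List.enumerate s.toList 0) (fun p => p.2) []
      (fun _ p => fun l => l ++ [p.1]) PySem.Dict.empty]
    rw [PySem.List.map_snd_enumerate]
    rfl
  have hnd : ((PySem.List.enumerate s.toList 0).foldl
      (fun d p => d.modify p.2 [] (fun l => l ++ [p.1])) PySem.Dict.empty).keys.Nodup := by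
    rw [hkeys]; exact PySem.Set.nodup_ofList _
  have hgetD : ∀ c, ((PySem.List.enumerate s.toList 0).foldl
      (fun d p => d.modify p.2 [] (fun l => l ++ [p.1])) PySem.Dict.empty).getD c []
      = occL s.toList c := by
    intro c
    rw [hfold, PySem.Dict.getD_foldl_modify_append]
    rw [List.filter_map, List.map_map]
    simp [occL, Function.comp_def]
  rw [PySem.Dict.values_eq_map_keys _ hnd [], hkeys, List.foldl_map]
  apply PySem.List.foldl_congr_mem
  intro acc c _
  rw [hgetD c]

-- ===== VERDICT (by name: the statement is the Claim_ definition above) =====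
theorem solution_spec : Claim_equal_solution := by
  intro s _
  unfold Spec_solution
  rw [solution_eq_AStA, solution_alt_eq]
  exact (main_inv s.toList).1
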